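-- pv_equiv track=rewrite | github.com/Esbern/semanticGIS | libs/semanticgis/abstract/functional_complexes/data_io.py | _infer_dataset_scale
-- ===== SOURCE A (Python) =====
-- from typing import Any, Dict, Optional, List, Union, cast
--
-- def _infer_dataset_scale(attributes: Dict[str, Dict[str, Any]]) -> Optional[str]:
--     if not attributes:
--         return None
--     unique_scales = {meta["scale"] for meta in attributes.values() if meta.get("scale")}
--     if not unique_scales:
--         return None
--     if len(unique_scales) == 1:
--         return unique_scales.pop()
--     return "mixed"
-- ===== SOURCE B (Python) =====
-- def _infer_dataset_scale(attributes):
--     _UNSET = object()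
--     found = _UNSET
--     for meta in attributes.values():
--         scale = meta.get("scale")
--         if not scale:
--             continue
--         if found is _UNSET:
--             found = scale
--         elif scale != found:
--             return "mixed"
--     return None if found is _UNSET else found
-- ===== Notes on version B (the rewrite author's own statement) =====
-- stated objective: simpler
-- what changed: B replaces A's set-comprehension-then-len inspection by a single pass that keeps one scalar sentinel and returns 'mixed' immediately on the first conflicting scale; no set is built and the empty-dict special case disappears.
import Mathlib
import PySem

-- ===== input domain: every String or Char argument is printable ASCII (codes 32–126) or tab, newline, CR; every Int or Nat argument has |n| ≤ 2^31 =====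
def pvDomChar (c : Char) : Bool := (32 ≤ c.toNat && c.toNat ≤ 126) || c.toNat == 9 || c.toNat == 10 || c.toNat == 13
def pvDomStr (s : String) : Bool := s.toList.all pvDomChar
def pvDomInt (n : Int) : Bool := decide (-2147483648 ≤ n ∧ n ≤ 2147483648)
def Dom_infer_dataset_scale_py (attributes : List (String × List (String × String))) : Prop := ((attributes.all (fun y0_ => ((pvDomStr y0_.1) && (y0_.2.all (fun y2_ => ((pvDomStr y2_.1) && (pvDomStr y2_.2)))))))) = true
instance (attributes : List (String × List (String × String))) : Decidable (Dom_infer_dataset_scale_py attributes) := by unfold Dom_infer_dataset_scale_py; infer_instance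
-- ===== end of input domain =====

-- B: one-pass sentinel scan with early exit instead of A's set comprehension + length inspection (simpler; same cost).


-- ===== PORT A =====
-- A: build the set {meta["scale"] for meta in attributes.values() if meta.get("scale")}, then inspect its size.
def infer_dataset_scale_py (attributes : List (String × List (String × String))) : Option String :=
  let d := PySem.Dict.ofList attributes
  if d.size = 0 then none
  else
    let unique_scales : PySem.Set String :=
      d.values.foldl (fun s m_ =>
        match (PySem.Dict.ofList m_).get? "scale" with
        | some v => if v ≠ "" then PySem.Set.add s v else s
        | none => s) PySem.Set.empty
    match unique_scales with
    | [] => none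
    | [x] => some x        -- len == 1: pop() the single element
    | _ => some "mixed"

-- ===== PORT B =====
-- B's loop: `found` sentinel is modelled by Option (none = _UNSET; a counted scale is never empty, so no clash)
def pvAltLoop (vs : List (List (String × String))) (found : Option String) : Option String :=
  match vs with
  | [] => found
  | m_ :: rest =>
      let scale := (PySem.Dict.ofList m_).get? "scale"
      match scale with
      | none => pvAltLoop rest found
      | some sc =>
        if sc = "" then pvAltLoop rest found
        else
          match found with
          | none => pvAltLoop rest (some sc)
          | some f => if sc ≠ f then some "mixed" else pvAltLoop rest found

def infer_dataset_scale_py_alt (attributes : List (String × List (String × String))) : Option String :=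
  pvAltLoop (PySem.Dict.ofList attributes).values none

-- ===== PRECONDITION & SPEC =====
def Spec_infer_dataset_scale_py (attributes : List (String × List (String × String))) (out : Option String) : Prop := out = infer_dataset_scale_py_alt attributes
instance (attributes : List (String × List (String × String))) (out : Option String) : Decidable (Spec_infer_dataset_scale_py attributes out) := by unfold Spec_infer_dataset_scale_py; infer_instance

-- ===== CLAIM (what is proved, stated in full; the proofs are below) =====
def Claim_equal_infer_dataset_scale_py : Prop := ∀ (attributes : List (String × List (String × String))), Dom_infer_dataset_scale_py attributes → Spec_infer_dataset_scale_py attributes (infer_dataset_scale_py attributes)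

-- ===== LEMMAS AND PROOFS =====

-- the scan B performs, expressed over the list of extracted nonempty scales
def pvScan (xs : List String) (found : Option String) : Option String :=
  match xs with
  | [] => found
  | x :: rest =>
      match found with
      | none => pvScan rest (some x)
      | some f => if x ≠ f then some "mixed" else pvScan rest found

-- the nonempty scale extracted from one meta dict, if any
def pvScale? (m_ : List (String × String)) : Option String :=
  match (PySem.Dict.ofList m_).get? "scale" with
  | some v => if v = "" then none else some v
  | none => none

-- A's fold is Set.update of the accumulator with the extracted scales
theorem foldA_eq_update (vs : List (List (String × String))) (s : PySem.Set String) :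
    vs.foldl (fun s m_ =>
        match (PySem.Dict.ofList m_).get? "scale" with
        | some v => if v ≠ "" then PySem.Set.add s v else s
        | none => s) s = PySem.Set.update s (vs.filterMap pvScale?) := by
  induction vs generalizing s with
  | nil => simp [PySem.Set.update]
  | cons m rest ih =>
      rw [List.foldl_cons, List.filterMap_cons]
      cases h : (PySem.Dict.ofList m).get? "scale" with
      | none =>
          have hs : pvScale? m = none := by simp [pvScale?, h]
          rw [hs]
          simp only [h]
          exact ih s
      | some v =>
          by_cases hv : v = ""
          · have hs : pvScale? m = none := by simp [pvScale?, h, hv]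
            rw [hs]
            simp only [hv]
            simpa using ih s
          · have hs : pvScale? m = some v := by simp [pvScale?, h, hv]
            rw [hs, PySem.Set.update_cons]
            simp only [h]
            rw [if_pos (by simpa using hv)]
            exact ih (PySem.Set.add s v)

-- B's loop only looks at the extracted scales
theorem altLoop_eq_scan (vs : List (List (String × String))) (found : Option String) :
    pvAltLoop vs found = pvScan (vs.filterMap pvScale?) found := by
  induction vs generalizing found with
  | nil => simp [pvAltLoop, pvScan]
  | cons m rest ih =>
      rw [List.filterMap_cons]
      cases h : (PySem.Dict.ofList m).get? "scale" with
      | none =>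
          have hs : pvScale? m = none := by simp [pvScale?, h]
          rw [hs]
          simp only [pvAltLoop, h]
          exact ih found
      | some v =>
          by_cases hv : v = ""
          · have hs : pvScale? m = none := by simp [pvScale?, h, hv]
            rw [hs]
            simp only [pvAltLoop, h, hv, if_pos]
            simpa using ih found
          · have hs : pvScale? m = some v := by simp [pvScale?, h, hv]
            rw [hs]
            simp only [pvAltLoop, h]
            rw [if_neg hv]
            cases found with
            | none => simp [pvScan, ih]
            | some f => by_cases hf : v = f <;> simp [pvScan, hf, ih]

theorem pvScan_some (xs : List String) (f : String) :
    pvScan xs (some f) = if xs.all (fun y => y == f) then some f else some "mixed" := by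
  induction xs generalizing f with
  | nil => simp [pvScan]
  | cons x rest ih =>
      by_cases hx : x = f
      · subst hx; simp [pvScan, ih]
      · simp [pvScan, hx]

theorem scan_eq_set_match (xs : List String) :
    pvScan xs none =
      (match PySem.Set.ofList xs with
       | [] => none
       | [x] => some x
       | _ => some "mixed") := by
  cases xs with
  | nil => simp [pvScan]
  | cons x rest =>
      have hof : PySem.Set.ofList (x :: rest) = PySem.Set.update [x] rest := by
        simp [PySem.Set.ofList_eq_foldl, PySem.Set.update, List.foldl, PySem.Set.add,
          PySem.Set.contains]
      have hupd := PySem.Set.update_eq_append_filter ([x] : PySem.Set String) rest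
      have hscan : pvScan (x :: rest) none = pvScan rest (some x) := by simp [pvScan]
      rw [hscan, pvScan_some, hof, hupd]
      by_cases hall : rest.all (fun y => y == x)
      · have hfil : List.filter (fun y => !PySem.Set.contains [x] y) (PySem.Set.ofList rest) = [] := by
          rw [List.filter_eq_nil_iff]
          intro y hy
          have hyr := (PySem.Set.mem_ofList rest y).1 hy
          have hx : y = x := by simpa using List.all_eq_true.1 hall y hyr
          simpa using hx
        rw [hfil]
        simp [hall]
      · cases hF : List.filter (fun y => !PySem.Set.contains [x] y) (PySem.Set.ofList rest) with
        | nil =>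
            exfalso
            apply hall
            rw [List.all_eq_true]
            intro y hy
            have hy' := (PySem.Set.mem_ofList rest y).2 hy
            have hkeep := List.filter_eq_nil_iff.1 hF y hy'
            simp at hkeep
            simp [hkeep]
        | cons a t => simp [hall]

-- ===== VERDICT (by name: the statement is the Claim_ definition above) =====
theorem infer_dataset_scale_py_spec : Claim_equal_infer_dataset_scale_py := by
  intro attributes _
  unfold Spec_infer_dataset_scale_py infer_dataset_scale_py infer_dataset_scale_py_alt
  rw [altLoop_eq_scan]
  by_cases hsz : (PySem.Dict.ofList attributes).size = 0
  · have hi : (PySem.Dict.ofList attributes).items = [] := by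
      simpa [PySem.Dict.size, List.length_eq_zero_iff] using hsz
    have hv : (PySem.Dict.ofList attributes).values = [] := by
      simp [PySem.Dict.values, hi]
    simp [hsz, hv, pvScan]
  · simp only [hsz, if_false]
    rw [foldA_eq_update, scan_eq_set_match, PySem.Set.update_empty]
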